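-- pv_equiv track=rewrite | github.com/ClampyStew/PRG_01v2 | MiniTask03/Incredible Cookies!!!/quirkycookies.py | calculate_ingredient_score
-- ===== SOURCE A (Python) =====
-- def calculate_ingredient_score(ingredients):
--     score = 0
--     for item in ingredients:
--         item_lower = item.strip().lower()
--         if item_lower == "sugar":
--             score += 5
--         elif item_lower == "butter":
--             score += 4
--         elif item_lower == "chocolate chips":
--             score += 3
--         elif item_lower == "flour":
--             score -= 2
--         else:
--             score += 1
--     return score
-- ===== SOURCE B (Python) =====
-- def calculate_ingredient_score(ingredients):
--     weights = {"sugar": 5, "butter": 4, "chocolate chips": 3, "flour": -2}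
--     counts = {}
--     for item in ingredients:
--         name = item.strip().lower()
--         counts[name] = counts.get(name, 0) + 1
--     score = 0
--     for name, cnt in counts.items():
--         score += weights.get(name, 1) * cnt
--     return score
-- ===== Notes on version B (the rewrite author's own statement) =====
-- stated objective: alternative
-- what changed: B first groups the normalized ingredient names into a count dictionary and then does one weighted pass over the distinct names via a weights table, instead of A's per-item if/elif comparison chain.
import Mathlib
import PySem

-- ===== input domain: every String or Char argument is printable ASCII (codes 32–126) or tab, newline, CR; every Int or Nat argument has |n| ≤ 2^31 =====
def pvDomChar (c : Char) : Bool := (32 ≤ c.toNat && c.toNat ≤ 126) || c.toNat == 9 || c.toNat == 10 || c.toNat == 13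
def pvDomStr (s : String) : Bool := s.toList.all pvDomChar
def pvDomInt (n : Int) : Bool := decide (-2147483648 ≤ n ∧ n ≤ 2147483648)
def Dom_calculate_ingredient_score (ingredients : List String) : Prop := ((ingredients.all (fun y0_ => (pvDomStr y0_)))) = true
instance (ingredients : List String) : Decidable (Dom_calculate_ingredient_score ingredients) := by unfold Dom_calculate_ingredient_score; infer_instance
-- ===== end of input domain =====

-- B groups the normalized names into a count dictionary and makes one weighted
-- pass over the distinct names via a weights table, instead of A's per-item
-- if/elif chain (objective: alternative, same cost).

-- ===== PORT A =====
def calculate_ingredient_score (ingredients : List String) : Int :=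
  ingredients.foldl (fun score item =>
    let item_lower := PySem.Str.lower (PySem.Str.strip item)
    if item_lower == "sugar" then score + 5
    else if item_lower == "butter" then score + 4
    else if item_lower == "chocolate chips" then score + 3
    else if item_lower == "flour" then score - 2
    else score + 1) 0

-- ===== PORT B =====
def pvWeights : PySem.Dict String Int :=
  PySem.Dict.ofList [("sugar", 5), ("butter", 4), ("chocolate chips", 3), ("flour", -2)]

def calculate_ingredient_score_alt (ingredients : List String) : Int :=
  let counts := ingredients.foldl (fun d item =>
      let name := PySem.Str.lower (PySem.Str.strip item)
      d.insert name (d.getD name 0 + 1)) PySem.Dict.empty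
  counts.items.foldl (fun score p => score + pvWeights.getD p.1 1 * p.2) 0

-- ===== PRECONDITION & SPEC =====
def Spec_calculate_ingredient_score (ingredients : List String) (out : Int) : Prop := out = calculate_ingredient_score_alt ingredients
instance (ingredients : List String) (out : Int) : Decidable (Spec_calculate_ingredient_score ingredients out) := by unfold Spec_calculate_ingredient_score; infer_instance

-- ===== CLAIM (what is proved, stated in full; the proofs are below) =====
def Claim_equal_calculate_ingredient_score : Prop := ∀ (ingredients : List String), Dom_calculate_ingredient_score ingredients → Spec_calculate_ingredient_score ingredients (calculate_ingredient_score ingredients)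

-- ===== LEMMAS AND PROOFS =====

-- the per-name weight both programs realize
def pvW (k : String) : Int :=
  if k = "sugar" then 5 else if k = "butter" then 4
  else if k = "chocolate chips" then 3 else if k = "flour" then -2 else 1

def pvNorm (s : String) : String := PySem.Str.lower (PySem.Str.strip s)

theorem pvWeights_getD (k : String) : pvWeights.getD k 1 = pvW k := by
  by_cases h1 : k = "sugar"
  · subst h1; decide
  by_cases h2 : k = "butter"
  · subst h2; decide
  by_cases h3 : k = "chocolate chips"
  · subst h3; decide
  by_cases h4 : k = "flour"
  · subst h4; decide
  have b1 : ("sugar" == k) = false := by simpa [beq_iff_eq] using fun e => h1 e.symm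
  have b2 : ("butter" == k) = false := by simpa [beq_iff_eq] using fun e => h2 e.symm
  have b3 : ("chocolate chips" == k) = false := by simpa [beq_iff_eq] using fun e => h3 e.symm
  have b4 : ("flour" == k) = false := by simpa [beq_iff_eq] using fun e => h4 e.symm
  have h : pvWeights = PySem.Dict.mk [("sugar", 5), ("butter", 4), ("chocolate chips", 3), ("flour", -2)] := by decide
  rw [h, PySem.Dict.getD_eq_get?_getD]
  simp [PySem.Dict.get?, b1, b2, b3, b4, pvW, h1, h2, h3, h4]

theorem pvA_eq_sum (ingredients : List String) :
    calculate_ingredient_score ingredients = ((ingredients.map (fun s => pvW (pvNorm s))).sum) := by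
  unfold calculate_ingredient_score
  have h1 : ingredients.foldl (fun score item =>
        let item_lower := PySem.Str.lower (PySem.Str.strip item)
        if item_lower == "sugar" then score + 5
        else if item_lower == "butter" then score + 4
        else if item_lower == "chocolate chips" then score + 3
        else if item_lower == "flour" then score - 2
        else score + 1) 0
      = ingredients.foldl (fun acc item => acc + pvW (pvNorm item)) 0 :=
    PySem.List.foldl_congr_mem ingredients _ _ 0 (by
      intro acc x _
      simp only [pvW, pvNorm, beq_iff_eq]
      split_ifs <;> ring)
  rw [h1, PySem.List.foldl_add]
  simp

-- sum over a duplicate-free key list containing x of (if x = k then f k else 0) is f x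
theorem pvSum_single (S : List String) (hS : S.Nodup) (x : String) (hx : x ∈ S) (f : String → Int) :
    (S.map (fun k => if x = k then f k else 0)).sum = f x := by
  induction S with
  | nil => cases hx
  | cons a t ih =>
    by_cases hxa : x = a
    · subst hxa
      have hz : (t.map (fun k => if x = k then f k else 0)).sum = 0 := by
        apply List.sum_eq_zero
        intro y hy
        rcases List.mem_map.mp hy with ⟨k, hk, rfl⟩
        have hne : x ≠ k := by rintro rfl; exact (List.nodup_cons.mp hS).1 hk
        simp [hne]
      simp [hz]
    · have hxt : x ∈ t := (List.mem_cons.mp hx).resolve_left hxa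
      have := ih (List.nodup_cons.mp hS).2 hxt
      simp [hxa, this]

-- grouped weighted count over any duplicate-free superset of l's values = plain weighted sum over l
theorem pvGrouped (S : List String) (hS : S.Nodup) (l : List String) (hl : ∀ x ∈ l, x ∈ S) :
    (S.map (fun k => pvW k * l.count k)).sum = (l.map pvW).sum := by
  induction l with
  | nil => simp
  | cons x t ih =>
    have hx : x ∈ S := hl x (List.mem_cons_self)
    have ht : ∀ y ∈ t, y ∈ S := fun y hy => hl y (List.mem_cons_of_mem _ hy)
    have split : ∀ k : String, pvW k * ((x :: t).count k : Int)
        = pvW k * (t.count k : Int) + (if x = k then pvW k else 0) := by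
      intro k
      by_cases h : x = k
      · subst h; simp; ring
      · simp [h]
    calc (S.map (fun k => pvW k * ((x :: t).count k : Int))).sum
        = (S.map (fun k => pvW k * (t.count k : Int) + (if x = k then pvW k else 0))).sum := by
          exact congrArg List.sum (List.map_congr_left (fun k _ => split k))
      _ = (S.map (fun k => pvW k * (t.count k : Int))).sum
          + (S.map (fun k => if x = k then pvW k else 0)).sum := by
          rw [← List.sum_map_add]
      _ = ((x :: t).map pvW).sum := by
          rw [ih ht, pvSum_single S hS x hx pvW, List.map_cons, List.sum_cons]; ring

theorem pvFoldMap (l : List String) (d : PySem.Dict String Int) :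
    l.foldl (fun d item => d.insert (pvNorm item) (d.getD (pvNorm item) 0 + 1)) d
      = (l.map pvNorm).foldl (fun d x => d.insert x (d.getD x 0 + 1)) d := by
  induction l generalizing d with
  | nil => simp only [List.map_nil, List.foldl_nil]
  | cons a t ih =>
    simp only [List.map_cons, List.foldl_cons]
    exact ih _

theorem pvB_eq_sum (ingredients : List String) :
    calculate_ingredient_score_alt ingredients = ((ingredients.map (fun s => pvW (pvNorm s))).sum) := by
  unfold calculate_ingredient_score_alt
  have hfold : ingredients.foldl (fun d item =>
        d.insert (pvNorm item) (d.getD (pvNorm item) 0 + 1)) PySem.Dict.empty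
      = PySem.Dict.counter (ingredients.map pvNorm) := by
    rw [← PySem.Dict.foldl_insert_getD_add_one_eq_counter]
    exact pvFoldMap ingredients PySem.Dict.empty
  simp only [pvNorm] at hfold
  rw [hfold, PySem.List.foldl_add, PySem.Dict.items_counter, List.map_map]
  have hcomp : ((fun p : String × Int => pvWeights.getD p.1 1 * p.2)
        ∘ (fun k => (k, ((ingredients.map pvNorm).count k : Int))))
      = fun k => pvW k * ((ingredients.map pvNorm).count k : Int) := by
    funext k; simp [Function.comp, pvWeights_getD]
  rw [hcomp, pvGrouped (PySem.Set.ofList (ingredients.map pvNorm)) (PySem.Set.nodup_ofList _)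
      (ingredients.map pvNorm) (fun x hx => (PySem.Set.mem_ofList _ _).mpr hx)]
  simp [List.map_map, Function.comp_def]

-- ===== VERDICT (by name: the statement is the Claim_ definition above) =====
theorem calculate_ingredient_score_spec : Claim_equal_calculate_ingredient_score := by
  intro ingredients _
  unfold Spec_calculate_ingredient_score
  rw [pvA_eq_sum, pvB_eq_sum]
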